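-- pv_equiv track=rewrite | github.com/aybturk/L3PI | GOOGLE/G-Label3.py | get_top_colors_from_pixels
-- ===== SOURCE A (Python) =====
-- from typing import List, Tuple, Dict
--
-- def get_top_colors_from_pixels(pixels: List[Tuple[int, int, int]], top_k=3) -> List[str]:
--     """
--     Piksel listesinden en sık geçen (R, G, B) renkleri bulup HEX formatında döndürür.
--     """
--     freq = {}
--     for rgb in pixels:
--         freq[rgb] = freq.get(rgb, 0) + 1
--     sorted_colors = sorted(freq.items(), key=lambda x: x[1], reverse=True)
--     top_colors = [c[0] for c in sorted_colors[:top_k]]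
--     hex_colors = [f'#{r:02X}{g:02X}{b:02X}' for (r, g, b) in top_colors]
--     return hex_colors
-- ===== SOURCE B (Python) =====
-- def get_top_colors_from_pixels(pixels, top_k=3):
--     freq = {}
--     for rgb in pixels:
--         freq[rgb] = freq.get(rgb, 0) + 1
--     buckets = {}
--     for color, cnt in freq.items():
--         buckets.setdefault(cnt, []).append(color)
--     ranked = []
--     if freq:
--         for c in range(max(buckets), 0, -1):
--             if c in buckets:
--                 ranked += buckets[c]
--     return ['#%02X%02X%02X' % rgb for rgb in ranked[:top_k]]
-- ===== Notes on version B (the rewrite author's own statement) =====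
-- stated objective: alternative
-- what changed: Replaces the comparison sort of the frequency table by a counting sort: colors are grouped into buckets keyed by their count and concatenated for counts descending, reproducing the stable descending order without sorting.
import Mathlib
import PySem

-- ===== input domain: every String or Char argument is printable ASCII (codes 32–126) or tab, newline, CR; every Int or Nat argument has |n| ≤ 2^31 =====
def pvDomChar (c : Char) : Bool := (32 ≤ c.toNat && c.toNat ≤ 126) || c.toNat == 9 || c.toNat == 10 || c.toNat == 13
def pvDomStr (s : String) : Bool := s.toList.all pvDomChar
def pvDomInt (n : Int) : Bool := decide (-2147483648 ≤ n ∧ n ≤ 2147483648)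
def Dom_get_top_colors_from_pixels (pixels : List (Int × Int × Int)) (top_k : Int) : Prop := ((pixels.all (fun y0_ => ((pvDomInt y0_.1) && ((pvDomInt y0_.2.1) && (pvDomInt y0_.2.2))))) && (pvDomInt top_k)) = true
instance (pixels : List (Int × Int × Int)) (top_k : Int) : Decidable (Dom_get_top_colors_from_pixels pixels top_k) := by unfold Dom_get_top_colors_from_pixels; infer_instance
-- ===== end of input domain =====

-- B replaces A's comparison sort of the frequency table by counting-sort buckets
-- (count → colors in insertion order, concatenated for counts descending); objective: alternative.

-- shared formatting helper: Python's f'{n:02X}' (uppercase hex, zero-padded to width 2,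
-- '-' prefix for negative values — exact for every int, matching CPython's format spec)
def pvHexDigit (d : Nat) : Char := if d < 10 then Char.ofNat (48 + d) else Char.ofNat (55 + d)

def pvToHex (n : Nat) : List Char :=
  if _h : n < 16 then [pvHexDigit n]
  else pvToHex (n / 16) ++ [pvHexDigit (n % 16)]
decreasing_by exact Nat.div_lt_self (by omega) (by omega)

def pvFmt02X (n : Int) : List Char :=
  if n < 0 then '-' :: pvToHex (-n).toNat
  else
    let ds := pvToHex n.toNat
    if ds.length < 2 then '0' :: ds else ds

def pvHexColor (p : Int × Int × Int) : String :=
  String.ofList ('#' :: (pvFmt02X p.1 ++ pvFmt02X p.2.1 ++ pvFmt02X p.2.2))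

-- ===== PORT A =====
def get_top_colors_from_pixels (pixels : List (Int × Int × Int)) (top_k : Int) : List String :=
  let freq := pixels.foldl (fun d rgb => d.insert rgb (d.getD rgb 0 + 1))
    (PySem.Dict.empty : PySem.Dict (Int × Int × Int) Int)
  let sorted_colors := PySem.List.sorted freq.items (fun x => x.2) true
  let top_colors := (PySem.List.slice sorted_colors none (some top_k)).map (fun c => c.1)
  top_colors.map pvHexColor

-- ===== PORT B =====
def get_top_colors_from_pixels_alt (pixels : List (Int × Int × Int)) (top_k : Int) : List String :=
  let freq := pixels.foldl (fun d rgb => d.insert rgb (d.getD rgb 0 + 1))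
    (PySem.Dict.empty : PySem.Dict (Int × Int × Int) Int)
  let buckets := freq.items.foldl
    (fun d p => d.modify p.2 [] (fun l => l ++ [p.1])) (PySem.Dict.empty : PySem.Dict Int (List (Int × Int × Int)))
  let ranked :=
    if freq.items = [] then ([] : List (Int × Int × Int))
    else
      match PySem.List.max? buckets.keys (fun x => x) with
      | none => []  -- unreachable: buckets is nonempty whenever freq is
      | some top =>
        (PySem.List.pyRange top 0 (-1)).foldl
          (fun acc c => if buckets.contains c then acc ++ buckets.getD c [] else acc) []
  (PySem.List.slice ranked none (some top_k)).map pvHexColor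

-- ===== PRECONDITION & SPEC =====
def Spec_get_top_colors_from_pixels (pixels : List (Int × Int × Int)) (top_k : Int) (out : List String) : Prop := out = get_top_colors_from_pixels_alt pixels top_k
instance (pixels : List (Int × Int × Int)) (top_k : Int) (out : List String) : Decidable (Spec_get_top_colors_from_pixels pixels top_k out) := by unfold Spec_get_top_colors_from_pixels; infer_instance

-- ===== CLAIM (what is proved, stated in full; the proofs are below) =====
def Claim_equal_get_top_colors_from_pixels : Prop := ∀ (pixels : List (Int × Int × Int)) (top_k : Int), Dom_get_top_colors_from_pixels pixels top_k → Spec_get_top_colors_from_pixels pixels top_k (get_top_colors_from_pixels pixels top_k)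

-- ===== LEMMAS AND PROOFS =====

-- bucket-concatenation view of a list, per key value c: the elements with key c, in order
def pvBuck {α : Type} (key : α → Int) (cs : List Int) (xs : List α) : List α :=
  cs.flatMap (fun c => xs.filter (fun x => key x == c))

theorem pvInsertBy_append_left {α : Type} (before : α → α → Bool) (x : α) (l1 l2 : List α)
    (h : ∀ y ∈ l1, before x y = false) :
    PySem.List.insertBy before x (l1 ++ l2) = l1 ++ PySem.List.insertBy before x l2 := by
  induction l1 with
  | nil => simp
  | cons a t ih =>
    have ha : before x a = false := h a (by simp)
    simp only [List.cons_append, PySem.List.insertBy, ha]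
    simp [ih (fun y hy => h y (by simp [hy]))]

theorem pvInsertBy_all_true {α : Type} (before : α → α → Bool) (x : α) (l : List α)
    (h : ∀ y ∈ l, before x y = true) :
    PySem.List.insertBy before x l = x :: l := by
  cases l with
  | nil => simp [PySem.List.insertBy]
  | cons a t => simp [PySem.List.insertBy, h a (by simp)]

theorem pvBuck_step {α : Type} (key : α → Int) (cs : List Int) (ys : List α) (x : α)
    (hps : cs.Pairwise (· > ·)) (hx : key x ∈ cs) :
    PySem.List.insertBy (fun a b => decide (key b < key a)) x (pvBuck key cs ys)
      = pvBuck key cs (ys ++ [x]) := by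
  induction cs with
  | nil => simp at hx
  | cons c cs' ih =>
    have hlt : ∀ c' ∈ cs', c' < c := by
      intro c' hc'; exact (List.pairwise_cons.1 hps).1 c' hc'
    have hcons : ∀ (zs : List α),
        pvBuck key (c :: cs') zs = zs.filter (fun z => key z == c) ++ pvBuck key cs' zs := by
      intro zs; simp only [pvBuck, List.flatMap_cons]
    by_cases hxc : key x = c
    · -- x belongs to the head bucket: it is appended at the end of that bucket
      have h1 : ∀ y ∈ ys.filter (fun z => key z == c), (fun a b => decide (key b < key a)) x y = false := by
        intro y hy
        have : key y = c := by simpa using (List.mem_filter.1 hy).2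
        simp [this, hxc]
      have h2 : ∀ y ∈ pvBuck key cs' ys, (fun a b => decide (key b < key a)) x y = true := by
        intro y hy
        rcases List.mem_flatMap.1 hy with ⟨c', hc', hy'⟩
        have : key y = c' := by simpa using (List.mem_filter.1 hy').2
        simp [this, hxc]; exact hlt c' hc'
      have hnot : ∀ c' ∈ cs', key x ≠ c' := by
        intro c' hc'; have := hlt c' hc'; omega
      have hfilhead : (ys ++ [x]).filter (fun z => key z == c) = ys.filter (fun z => key z == c) ++ [x] := by
        simp [List.filter_append, hxc]
      have htail : pvBuck key cs' (ys ++ [x]) = pvBuck key cs' ys := by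
        unfold pvBuck
        refine List.flatMap_congr (fun c' hc' => ?_)
        simp [List.filter_append, hnot c' hc']
      rw [hcons ys, pvInsertBy_append_left _ _ _ _ h1, pvInsertBy_all_true _ _ _ h2,
          hcons (ys ++ [x]), hfilhead, htail]
      simp
    · -- x belongs to a later bucket
      have hx' : key x ∈ cs' := by
        rcases List.mem_cons.1 hx with h | h
        · exact absurd h hxc
        · exact h
      have h1 : ∀ y ∈ ys.filter (fun z => key z == c), (fun a b => decide (key b < key a)) x y = false := by
        intro y hy
        have hyc : key y = c := by simpa using (List.mem_filter.1 hy).2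
        have : key x < c := hlt _ hx'
        simp [hyc]; omega
      have hfilhead : (ys ++ [x]).filter (fun z => key z == c) = ys.filter (fun z => key z == c) := by
        simp [List.filter_append, hxc]
      rw [hcons ys, pvInsertBy_append_left _ _ _ _ h1,
          hcons (ys ++ [x]), hfilhead, ih (List.pairwise_cons.1 hps).2 hx']

-- stable descending sort IS the bucket concatenation over any strictly descending
-- count list covering all keys
theorem pvSorted_eq_buck {α : Type} (key : α → Int) (cs : List Int) (xs : List α)
    (hps : cs.Pairwise (· > ·)) (hcov : ∀ x ∈ xs, key x ∈ cs) :
    PySem.List.sorted xs key true = pvBuck key cs xs := by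
  induction xs using List.reverseRecOn with
  | nil => simp [PySem.List.sorted, pvBuck]
  | append_singleton ys x ih =>
    rw [PySem.List.sorted_rev_eq_foldl_insertBy, List.foldl_append]
    simp only [List.foldl_cons, List.foldl_nil]
    rw [← PySem.List.sorted_rev_eq_foldl_insertBy,
        ih (fun z hz => hcov z (by simp [hz])),
        pvBuck_step key cs ys x hps (hcov x (by simp))]

-- xs[:k] commutes with map (slice with no lower bound is a length-clamped take,
-- and map preserves length)
theorem pvSlice_to_map {α β : Type} (f : α → β) (xs : List α) (b : Int) :
    PySem.List.slice (xs.map f) none (some b) = (PySem.List.slice xs none (some b)).map f := by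
  rcases le_or_gt 0 b with hb | hb
  · rw [PySem.List.slice_to _ hb, PySem.List.slice_to _ hb, List.map_take]
  · obtain ⟨k, hk, rfl⟩ : ∃ k : Nat, 0 < k ∧ b = -(k : Int) := ⟨b.natAbs, by omega, by omega⟩
    rw [PySem.List.slice_to_neg_natCast _ _ hk, PySem.List.slice_to_neg_natCast _ _ hk,
        List.map_take, List.length_map]

-- a slice with no lower bound of [] is []
theorem pvSlice_to_nil {α : Type} (b : Int) : PySem.List.slice ([] : List α) none (some b) = [] := by
  have h := fun x => PySem.List.mem_of_mem_slice (xs := ([] : List α)) (a? := none) (b? := some b) (x := x)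
  cases hE : PySem.List.slice ([] : List α) none (some b) with
  | nil => rfl
  | cons y t => exact absurd (h y (by rw [hE]; simp)) (by simp)

-- ===== VERDICT (by name: the statement is the Claim_ definition above) =====
theorem get_top_colors_from_pixels_spec : Claim_equal_get_top_colors_from_pixels := by
  intro pixels top_k _
  show get_top_colors_from_pixels pixels top_k = get_top_colors_from_pixels_alt pixels top_k
  simp only [get_top_colors_from_pixels, get_top_colors_from_pixels_alt,
    PySem.Dict.foldl_insert_getD_add_one_eq_counter]
  set d := PySem.Dict.counter pixels with hd
  by_cases hnil : d.items = []
  · rw [hnil, if_pos rfl]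
    have hs : PySem.List.sorted ([] : List ((Int × Int × Int) × Int)) (fun x => x.2) true = [] := by
      simp [PySem.List.sorted]
    rw [hs, pvSlice_to_nil, pvSlice_to_nil]
    simp
  · rw [if_neg hnil]
    set buckets := d.items.foldl
      (fun b p => b.modify p.2 [] (fun l => l ++ [p.1]))
      (PySem.Dict.empty : PySem.Dict Int (List (Int × Int × Int))) with hbuckets
    have hkeys : buckets.keys = PySem.Set.ofList (d.items.map (fun p => p.2)) := by
      rw [hbuckets, PySem.Dict.keys_foldl_modify_key d.items (fun p => p.2) []
        (fun _ p => (fun l => l ++ [p.1])) PySem.Dict.empty]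
      rfl
    have hkne : buckets.keys ≠ [] := by
      obtain ⟨p, hp⟩ := List.exists_mem_of_ne_nil _ hnil
      intro hE
      have : p.2 ∈ buckets.keys := by
        rw [hkeys]
        exact (PySem.Set.mem_ofList _ _).2 (List.mem_map_of_mem hp)
      rw [hE] at this; simp at this
    cases hmax : PySem.List.max? buckets.keys (fun x => x) with
    | none => exact absurd ((PySem.List.max?_eq_none_iff _ _).1 hmax) hkne
    | some top =>
      have htople : ∀ y ∈ buckets.keys, y ≤ top := by
        intro y hy
        exact PySem.List.max?_isMax hmax y hy
      have hps : (PySem.List.pyRange top 0 (-1)).Pairwise (· > ·) := by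
        rw [PySem.List.pyRange_neg_one_eq_reverse]
        rw [List.pairwise_reverse]
        exact PySem.List.pairwise_lt_pyRange_one _ _
      have hcov : ∀ p ∈ d.items, p.2 ∈ PySem.List.pyRange top 0 (-1) := by
        intro p hp
        have h2 : p.2 ∈ buckets.keys := by
          rw [hkeys]; exact (PySem.Set.mem_ofList _ _).2 (List.mem_map_of_mem hp)
        have hle := htople _ h2
        have hpos : 1 ≤ p.2 := by
          rw [hd, PySem.Dict.items_counter] at hp
          obtain ⟨k, hk, hpk⟩ := List.mem_map.1 hp
          have hkp : k ∈ pixels := (PySem.Set.mem_ofList _ _).1 hk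
          have hc : 0 < pixels.count k := List.count_pos_iff.2 hkp
          have hp2 : p.2 = (pixels.count k : Int) := by rw [← hpk]
          rw [hp2]
          exact_mod_cast hc
        exact PySem.List.mem_pyRange_neg_one.2 ⟨by omega, hle⟩
      have hbget : ∀ c, buckets.getD c []
          = (d.items.filter (fun p => p.2 == c)).map (fun p => p.1) := by
        intro c
        have h1 : buckets = (d.items.map Prod.swap).foldl
            (fun b q => b.modify q.1 [] (fun l => l ++ [q.2])) PySem.Dict.empty := by
          rw [hbuckets, List.foldl_map]
          rfl
        rw [h1, PySem.Dict.getD_foldl_modify_append]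
        simp [List.filter_map, List.map_map, Function.comp_def, Prod.swap]
      have hcontF : ∀ c, buckets.contains c = false →
          d.items.filter (fun p => p.2 == c) = [] := by
        intro c hc
        have hnk : c ∉ buckets.keys := by
          intro hmem
          have := (PySem.Dict.contains_iff_mem_keys _ _).2 hmem
          rw [hc] at this
          cases this
        rw [hkeys] at hnk
        have : c ∉ d.items.map (fun p => p.2) := fun h => hnk ((PySem.Set.mem_ofList _ _).2 h)
        rw [List.filter_eq_nil_iff]
        intro p hp hpc
        exact this (List.mem_map.2 ⟨p, hp, by simpa using hpc⟩)
      have hrank : (PySem.List.pyRange top 0 (-1)).foldl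
            (fun acc c => if buckets.contains c then acc ++ buckets.getD c [] else acc) []
          = (PySem.List.pyRange top 0 (-1)).flatMap
            (fun c => (d.items.filter (fun p => p.2 == c)).map (fun p => p.1)) := by
        have hcg : ∀ (acc : List (Int × Int × Int)) (c : Int),
            c ∈ PySem.List.pyRange top 0 (-1) →
            (if buckets.contains c then acc ++ buckets.getD c [] else acc)
              = acc ++ (d.items.filter (fun p => p.2 == c)).map (fun p => p.1) := by
          intro acc c _
          by_cases h : buckets.contains c
          · simp [h, hbget c]
          · have hf := hcontF c (by simpa using h)
            simp [h, hf]
        have h2 : (PySem.List.pyRange top 0 (-1)).foldl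
              (fun acc c => if buckets.contains c then acc ++ buckets.getD c [] else acc) []
            = (PySem.List.pyRange top 0 (-1)).foldl
              (fun acc c => acc ++ (d.items.filter (fun p => p.2 == c)).map (fun p => p.1)) [] :=
          PySem.List.foldl_congr_mem _ _ _ _ hcg
        rw [h2, PySem.List.foldl_append_eq_flatMap]
        simp
      have hsorted : PySem.List.sorted d.items (fun x => x.2) true
          = pvBuck (fun p => p.2) (PySem.List.pyRange top 0 (-1)) d.items :=
        pvSorted_eq_buck _ _ _ hps hcov
      have hflat : (PySem.List.pyRange top 0 (-1)).flatMap
            (fun c => (d.items.filter (fun p => p.2 == c)).map (fun p => p.1))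
          = (pvBuck (fun p : (Int × Int × Int) × Int => p.2)
              (PySem.List.pyRange top 0 (-1)) d.items).map (fun p => p.1) := by
        simp [pvBuck, List.map_flatMap]
      rw [hsorted]
      simp only [hrank, hflat, pvSlice_to_map, List.map_map]
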